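-- pv_equiv track=rewrite | github.com/lillux/spacenumbat | spacenumbat/utils.py | generate_postfix
-- ===== SOURCE A (Python) =====
-- from typing import Dict, List, Union, Sequence, Any, Optional, Iterable, Literal
-- import string
--
-- def generate_postfix(n:List):
--     '''
--     Generate alphabetical postfixes for a list of positive integers.
--
--     Parameters
--     ----------
--     n : List
--         A list of positive integers.
--
--     Raises
--     ------
--     ValueError
--         Raise ValueError if any of the integers are None.
--
--     Returns
--     -------
--     postfixes : List[str]
--         Alphabetical postfixes corresponding to the integers.
--
--     '''
--
--     if any(x is None for x in n):
--         raise ValueError("Segment number cannot contain NA")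
--
--     alphabet = list(string.ascii_lowercase)
--     len_alphabet = len(alphabet)
--     postfixes = []
--     for number in n:
--         i = int(number)  # Ensure the number is an integer
--         postfix = ''
--         while True:
--             i, remainder = divmod(i, len_alphabet)
--             postfix = alphabet[remainder] + postfix
--             if i == 0:
--                 break
--         postfixes.append(postfix)
--     return postfixes
-- ===== SOURCE B (Python) =====
-- import string
--
-- def _postfix(i):
--     # find the highest power of 26 not exceeding i, then emit digits
--     # most-significant-first by positional extraction
--     p = 1
--     while p * 26 <= i:
--         p *= 26
--     s = ''
--     while p > 0:
--         s += string.ascii_lowercase[(i // p) % 26]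
--         p //= 26
--     return s
--
-- def generate_postfix(n):
--     if any(x is None for x in n):
--         raise ValueError("Segment number cannot contain NA")
--     return [_postfix(int(number)) for number in n]
-- ===== Notes on version B (the rewrite author's own statement) =====
-- stated objective: alternative
-- what changed: Replaces A's least-significant-first remainder loop that prepends each digit onto an accumulator string with positional extraction: find the highest power of 26 not exceeding the number, then emit digits most-significant-first by dividing by descending powers; the append loop becomes a comprehension over a helper.
import Mathlib
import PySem

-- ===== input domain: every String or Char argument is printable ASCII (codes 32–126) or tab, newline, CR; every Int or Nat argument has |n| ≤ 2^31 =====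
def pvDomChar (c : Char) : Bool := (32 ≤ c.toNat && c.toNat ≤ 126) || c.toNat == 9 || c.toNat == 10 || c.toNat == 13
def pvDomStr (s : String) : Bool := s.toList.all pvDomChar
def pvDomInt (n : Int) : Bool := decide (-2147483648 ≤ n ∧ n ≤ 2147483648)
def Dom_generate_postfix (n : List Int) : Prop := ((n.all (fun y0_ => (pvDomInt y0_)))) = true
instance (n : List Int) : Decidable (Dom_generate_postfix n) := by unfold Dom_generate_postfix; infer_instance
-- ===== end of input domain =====

-- B replaces A's remainder loop (least-significant digit first, prepended onto an accumulator)
-- with positional extraction: find the highest power of 26 not exceeding the number, then emit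
-- digits most-significant-first by division; alternative algorithm, same cost.


-- ===== PORT A =====
-- alphabet = list(string.ascii_lowercase)
def pvAlphabet : List Char :=
  ['a','b','c','d','e','f','g','h','i','j','k','l','m','n','o','p','q','r','s','t','u','v','w','x','y','z']

-- A's 'while True' loop: i, remainder = divmod(i, 26); postfix = alphabet[remainder] + postfix;
-- break when i == 0.  Strings are carried as List Char (exact: lowercase ASCII only).
-- The fuel argument only makes the recursion total; for i ≥ 0, fuel = i.toNat + 1 always suffices
-- (for i < 0 the Python loop never terminates; such inputs are excluded by Pre_ below).
def pvLoopA : Nat → Int → List Char → List Char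
  | 0, _, post => post
  | fuel + 1, i, post =>
    let q := PySem.Int.floordiv i 26
    let r := PySem.Int.mod i 26
    let post' := ((PySem.List.pyGet? pvAlphabet r).getD 'a') :: post  -- r ∈ [0,26): never none
    if q = 0 then post' else pvLoopA fuel q post'

def generate_postfix (n : List Int) : List String :=
  n.foldl (fun postfixes number => postfixes ++ [String.mk (pvLoopA (number.toNat + 1) number [])]) []

-- ===== PORT B =====
-- first while loop of _postfix: p = 1; while p * 26 <= i: p *= 26
-- (fuel device for totality; fuel = i.toNat + 1 suffices for i ≥ 0)
def pvFindPow : Nat → Int → Int → Int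
  | 0, _, p => p
  | fuel + 1, i, p => if p * 26 ≤ i then pvFindPow fuel i (p * 26) else p

-- second while loop of _postfix: while p > 0: s += alphabet[(i // p) % 26]; p //= 26
def pvEmit : Nat → Int → Int → List Char
  | 0, _, _ => []
  | fuel + 1, i, p =>
    if 0 < p then
      ((PySem.List.pyGet? pvAlphabet (PySem.Int.mod (PySem.Int.floordiv i p) 26)).getD 'a')
        :: pvEmit fuel i (PySem.Int.floordiv p 26)
    else []

def pvPostfixB (i : Int) : List Char :=
  pvEmit (i.toNat + 1) i (pvFindPow (i.toNat + 1) i 1)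

def generate_postfix_alt (n : List Int) : List String :=
  n.map (fun number => String.mk (pvPostfixB number))

-- ===== PRECONDITION & SPEC =====
-- Pre_ excludes lists containing a negative integer: there A's while-loop never terminates
-- (divmod keeps returning quotient -1), so A returns no value.
def Pre_generate_postfix (n : List Int) : Prop := ∀ x ∈ n, 0 ≤ x
instance (n : List Int) : Decidable (Pre_generate_postfix n) := by unfold Pre_generate_postfix; infer_instance
def pvWitness_generate_postfix : List Int := [0, 25, 26, 701, 702]

def Spec_generate_postfix (n : List Int) (out : List String) : Prop := out = generate_postfix_alt n
instance (n : List Int) (out : List String) : Decidable (Spec_generate_postfix n out) := by unfold Spec_generate_postfix; infer_instance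

-- ===== CLAIM (what is proved, stated in full; the proofs are below) =====
def Claim_equal_generate_postfix : Prop := ∀ (n : List Int), Dom_generate_postfix n → Pre_generate_postfix n → Spec_generate_postfix n (generate_postfix n)

-- ===== LEMMAS AND PROOFS =====
-- digit m = alphabet[m]
def pvDig (k : Nat) : Char := pvAlphabet.getD k 'a'

-- reference base-26 representation of a natural number (least-significant digit appended last)
def pvRep (m : Nat) : List Char :=
  if h : m < 26 then [pvDig m] else pvRep (m / 26) ++ [pvDig (m % 26)]
  decreasing_by exact Nat.div_lt_self (by omega) (by omega)

-- digits of positions k..0 of m, most significant first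
def pvExtract : Nat → Nat → List Char
  | 0, m => [pvDig (m % 26)]
  | k + 1, m => pvDig (m / 26 ^ (k + 1) % 26) :: pvExtract k m

theorem pvCastFloordiv26 (a : Nat) : PySem.Int.floordiv (a : Int) 26 = ((a / 26 : Nat) : Int) := by
  exact_mod_cast PySem.Int.floordiv_natCast a 26

theorem pvCastMod26 (a : Nat) : PySem.Int.mod (a : Int) 26 = ((a % 26 : Nat) : Int) := by
  exact_mod_cast PySem.Int.mod_natCast a 26

theorem pvLoopA_eq_rep (fuel m : Nat) (post : List Char) (hf : m < fuel) :
    pvLoopA fuel (m : Int) post = pvRep m ++ post := by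
  induction fuel generalizing m post with
  | zero => omega
  | succ f ih =>
    rw [pvLoopA]
    simp only [pvCastFloordiv26 m, pvCastMod26 m, PySem.List.pyGet?_natCast]
    by_cases h26 : m < 26
    · have hq : ((m / 26 : Nat) : Int) = 0 := by
        have : m / 26 = 0 := Nat.div_eq_of_lt h26
        exact_mod_cast this
      rw [if_pos hq, pvRep, dif_pos h26]
      have : m % 26 = m := Nat.mod_eq_of_lt h26
      simp [this, pvDig, List.getD_eq_getElem?_getD]
    · have hq : ¬ ((m / 26 : Nat) : Int) = 0 := by
        have : 26 ≤ m := by omega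
        have : 1 ≤ m / 26 := (Nat.one_le_div_iff (by omega)).2 this
        omega
      rw [if_neg hq, ih (m / 26) _ (by
        have := Nat.div_lt_self (by omega : 0 < m) (by omega : 1 < 26); omega)]
      conv_rhs => rw [pvRep]
      rw [dif_neg h26]
      simp [pvDig, List.getD_eq_getElem?_getD]

theorem pvExtract_succ (k m : Nat) :
    pvExtract (k + 1) m = pvExtract k (m / 26) ++ [pvDig (m % 26)] := by
  induction k generalizing m with
  | zero => simp [pvExtract]
  | succ j ih =>
    rw [pvExtract, ih, pvExtract]
    have : m / 26 ^ (j + 1 + 1) = m / 26 / 26 ^ (j + 1) := by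
      rw [Nat.div_div_eq_div_mul, pow_succ']
    simp [this]

theorem pvExtract_eq_rep (k m : Nat) (h1 : 26 ^ k ≤ m) (h2 : m < 26 ^ (k + 1)) :
    pvExtract k m = pvRep m := by
  induction k generalizing m with
  | zero =>
    have hm : m < 26 := by simpa using h2
    rw [pvExtract, pvRep, dif_pos hm, Nat.mod_eq_of_lt hm]
  | succ j ih =>
    have h26 : ¬ m < 26 := by
      have : (26:Nat) ≤ 26 ^ (j + 1) := Nat.le_self_pow (by omega) 26
      omega
    have e : 26 ^ (j + 1) = 26 ^ j * 26 := pow_succ 26 j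
    have e2 : 26 ^ (j + 1 + 1) = 26 ^ (j + 1) * 26 := pow_succ 26 (j + 1)
    rw [pvExtract_succ, pvRep, dif_neg h26, ih (m / 26)
      (Nat.le_div_iff_mul_le (by omega) |>.2 (by omega))
      ((Nat.div_lt_iff_lt_mul (by omega)).2 (by omega))]

theorem pvFindPow_eq (fuel k m : Nat) (h1 : 26 ^ k ≤ m)
    (h2 : m < 26 ^ (k + fuel)) :
    pvFindPow fuel (m : Int) ((26 ^ k : Nat) : Int) = ((26 ^ (Nat.log 26 m) : Nat) : Int) := by
  induction fuel generalizing k with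
  | zero => simp only [Nat.add_zero] at h2; omega
  | succ f ih =>
    rw [pvFindPow]
    have epow : 26 ^ (k + 1) = 26 ^ k * 26 := pow_succ 26 k
    by_cases hleN : 26 ^ k * 26 ≤ m
    · have hle : ((26 ^ k : Nat) : Int) * 26 ≤ (m : Int) := by exact_mod_cast hleN
      rw [if_pos hle]
      have ecast : ((26 ^ k : Nat) : Int) * 26 = ((26 ^ (k + 1) : Nat) : Int) := by
        push_cast [pow_succ]; ring
      rw [ecast]
      have eexp : k + 1 + f = k + (f + 1) := by omega
      exact ih (k + 1) (by omega) (by rw [eexp]; exact h2)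
    · have hle : ¬ ((26 ^ k : Nat) : Int) * 26 ≤ (m : Int) := by exact_mod_cast hleN
      rw [if_neg hle]
      have hlt : m < 26 ^ (k + 1) := by omega
      have hm : m ≠ 0 := by
        have : (1:Nat) ≤ 26 ^ k := Nat.one_le_pow _ _ (by omega)
        omega
      have : Nat.log 26 m = k := Nat.log_eq_of_pow_le_of_lt_pow h1 hlt
      rw [this]

theorem pvEmit_eq_extract (fuel k m : Nat) (h : k < fuel) :
    pvEmit fuel (m : Int) ((26 ^ k : Nat) : Int) = pvExtract k m := by
  induction fuel generalizing k with
  | zero => omega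
  | succ f ih =>
    rw [pvEmit]
    have hpos : (0:Int) < ((26 ^ k : Nat) : Int) := by
      have : (1:Nat) ≤ 26 ^ k := Nat.one_le_pow _ _ (by omega)
      exact_mod_cast this
    rw [if_pos hpos, PySem.Int.floordiv_natCast m (26 ^ k), pvCastMod26 (m / 26 ^ k),
      pvCastFloordiv26 (26 ^ k)]
    cases k with
    | zero =>
      have h126 : (1:Nat) / 26 = 0 := by decide
      simp only [pow_zero, Nat.div_one, h126]
      have hz : pvEmit f (m : Int) (((0:Nat)) : Int) = [] := by
        cases f <;> simp [pvEmit]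
      rw [hz, pvExtract]
      simp only [PySem.List.pyGet?_natCast, pvDig, List.getD_eq_getElem?_getD]
    | succ j =>
      have hdiv : (26 ^ (j + 1) : Nat) / 26 = 26 ^ j := by
        rw [pow_succ, Nat.mul_div_cancel _ (by omega)]
      rw [hdiv, ih j (by omega), pvExtract]
      simp only [PySem.List.pyGet?_natCast, pvDig, List.getD_eq_getElem?_getD]

theorem pvPostfixB_eq_rep (m : Nat) : pvPostfixB (m : Int) = pvRep m := by
  unfold pvPostfixB
  have htn : ((m : Int)).toNat = m := Int.toNat_natCast m
  rw [htn]
  by_cases hm : m = 0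
  · subst hm
    rw [pvRep]
    decide
  · have h1 : 26 ^ 0 ≤ m := by simpa using Nat.one_le_iff_ne_zero.2 hm
    have h2 : m < 26 ^ (0 + (m + 1)) := by
      have := Nat.lt_pow_self (by omega : 1 < 26) (n := m)
      calc m < 26 ^ m := this
        _ ≤ 26 ^ (0 + (m + 1)) := Nat.pow_le_pow_right (by omega) (by omega)
    have hfp : pvFindPow (m + 1) (m : Int) (((26 ^ 0 : Nat) : Int)) = ((26 ^ (Nat.log 26 m) : Nat) : Int) :=
      pvFindPow_eq (m + 1) 0 m h1 h2
    simp only [pow_zero, Nat.cast_one] at hfp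
    rw [hfp, pvEmit_eq_extract (m + 1) (Nat.log 26 m) m (by
      have := Nat.log_le_self 26 m; omega)]
    exact pvExtract_eq_rep _ _ (Nat.pow_log_le_self 26 hm) (Nat.lt_pow_succ_log_self (by omega) m)

-- ===== VERDICT (by name: the statement is the Claim_ definition above) =====
theorem generate_postfix_spec : Claim_equal_generate_postfix := by
  intro n _ hpre
  unfold Spec_generate_postfix generate_postfix generate_postfix_alt
  rw [PySem.List.foldl_append_singleton_eq_map]
  apply List.map_congr_left
  intro x hx
  have hx0 : 0 ≤ x := hpre x hx
  obtain ⟨m, rfl⟩ : ∃ m : Nat, x = (m : Int) := ⟨x.toNat, (Int.toNat_of_nonneg hx0).symm⟩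
  have htn : ((m : Int)).toNat = m := Int.toNat_natCast m
  rw [htn, pvLoopA_eq_rep (m + 1) m [] (by omega), pvPostfixB_eq_rep]
  simp
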